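-- pv_equiv track=rewrite | github.com/pjslina/tutorials-learn | hw-excel5.py | collect_keys_in_order
-- ===== SOURCE A (Python) =====
-- def collect_keys_in_order(list_data):
--     """按首次出现顺序收集所有键"""
--     ordered = []
--     seen = set()
--     for item in list_data:
--         for k in item.keys():
--             if k not in seen:
--                 seen.add(k)
--                 ordered.append(k)
--     return ordered
-- ===== SOURCE B (Python) =====
-- def collect_keys_in_order(list_data):
--     """按首次出现顺序收集所有键"""
--     keys = [k for item in list_data for k in item.keys()]
--     return [k for i, k in enumerate(keys) if k not in keys[:i]]
-- ===== Notes on version B (the rewrite author's own statement) =====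
-- stated objective: alternative
-- what changed: B keeps no state at all: it flattens the key stream and selects each position whose key does not appear in the prefix before it (a stateless positional filter with a quadratic prefix scan), instead of A's single pass maintaining a seen-set and an ordered accumulator with a membership branch.
import Mathlib
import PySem

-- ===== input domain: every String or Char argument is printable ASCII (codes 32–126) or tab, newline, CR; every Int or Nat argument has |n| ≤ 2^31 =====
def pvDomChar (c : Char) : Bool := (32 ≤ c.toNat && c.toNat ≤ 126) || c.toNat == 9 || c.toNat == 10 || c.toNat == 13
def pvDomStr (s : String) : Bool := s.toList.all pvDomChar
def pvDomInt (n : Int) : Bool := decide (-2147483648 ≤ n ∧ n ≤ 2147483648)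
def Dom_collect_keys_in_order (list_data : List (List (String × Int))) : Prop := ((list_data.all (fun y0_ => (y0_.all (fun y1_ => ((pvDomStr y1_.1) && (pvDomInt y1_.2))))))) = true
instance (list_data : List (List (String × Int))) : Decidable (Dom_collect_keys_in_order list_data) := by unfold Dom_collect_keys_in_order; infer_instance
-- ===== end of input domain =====

-- B drops A's seen-set/accumulator state: it flattens the key stream and keeps each
-- position whose key does not occur in the prefix before it (stateless positional filter).

-- ===== PORT A =====
-- explicit loop with (ordered, seen) state; 'if k not in seen: seen.add(k); ordered.append(k)'
def collect_keys_in_order (list_data : List (List (String × Int))) : List String :=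
  (list_data.foldl
    (fun st item =>
      ((PySem.Dict.ofList item).keys).foldl
        (fun (st' : List String × PySem.Set String) k =>
          if PySem.Set.contains st'.2 k then st'
          else (st'.1 ++ [k], PySem.Set.add st'.2 k))
        st)
    ([], PySem.Set.empty)).1

-- ===== PORT B =====
-- keys = [k for item in list_data for k in item.keys()]
-- return [k for i, k in enumerate(keys) if k not in keys[:i]]
def collect_keys_in_order_alt (list_data : List (List (String × Int))) : List String :=
  let keys := list_data.flatMap (fun item => (PySem.Dict.ofList item).keys)
  (PySem.List.enumerate keys).foldl
    (fun acc ik =>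
      if (PySem.List.slice keys none (some ik.1)).contains ik.2 then acc
      else acc ++ [ik.2])
    []

-- ===== PRECONDITION & SPEC =====
def Spec_collect_keys_in_order (list_data : List (List (String × Int))) (out : List String) : Prop := out = collect_keys_in_order_alt list_data
instance (list_data : List (List (String × Int))) (out : List String) : Decidable (Spec_collect_keys_in_order list_data out) := by unfold Spec_collect_keys_in_order; infer_instance

-- ===== CLAIM (what is proved, stated in full; the proofs are below) =====
def Claim_equal_collect_keys_in_order : Prop := ∀ (list_data : List (List (String × Int))), Dom_collect_keys_in_order list_data → Spec_collect_keys_in_order list_data (collect_keys_in_order list_data)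

-- ===== LEMMAS AND PROOFS =====

-- common reference: first occurrences of 'tail' whose key is absent from the running prefix 'p'
def pvFirstOccs (p : List String) : List String → List String
  | [] => []
  | k :: t => if p.contains k then pvFirstOccs (p ++ [k]) t
              else k :: pvFirstOccs (p ++ [k]) t

-- A's inner loop from a state (o, s) where s's membership agrees with list p
theorem pv_A_loop (tail : List String) (o : List String) (s : PySem.Set String)
    (p : List String) (h : ∀ x, PySem.Set.contains s x = p.contains x) :
    tail.foldl
      (fun (st' : List String × PySem.Set String) k =>
        if PySem.Set.contains st'.2 k then st'
        else (st'.1 ++ [k], PySem.Set.add st'.2 k)) (o, s)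
    = (o ++ pvFirstOccs p tail,
       tail.foldl PySem.Set.add s) := by
  induction tail generalizing o s p with
  | nil => simp [pvFirstOccs]
  | cons k t ih =>
    simp only [List.foldl_cons, pvFirstOccs]
    by_cases hk : p.contains k = true
    · have hc : PySem.Set.contains s k = true := (h k).trans hk
      rw [if_pos hc, if_pos hk]
      have hadd : PySem.Set.add s k = s := by
        unfold PySem.Set.add; rw [if_pos hc]
      rw [hadd]
      refine ih o s (p ++ [k]) ?_
      intro x
      rw [h x]
      by_cases hxk : x = k
      · subst hxk
        simp only [List.contains_append]
        have : x ∈ p := List.contains_iff_mem.mp hk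
        simp [this]
      · simp [hxk]
    · have hc : PySem.Set.contains s k = false := by
        rw [h k]; exact eq_false_of_ne_true hk
      have hcn : ¬ (PySem.Set.contains s k = true) := by rw [hc]; simp
      rw [if_neg hcn, if_neg hk]
      have hadd : PySem.Set.add s k = s ++ [k] := by
        unfold PySem.Set.add; rw [if_neg hcn]
      rw [ih (o ++ [k]) (PySem.Set.add s k) (p ++ [k]) (by
        intro x
        rw [hadd]
        simp only [PySem.Set.contains, List.contains_append] at h ⊢
        rw [h x])]
      simp

-- A's outer loop is the same loop over the flattened key stream
theorem pv_A_outer (ls : List (List (String × Int))) (o : List String)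
    (s : PySem.Set String) :
    ls.foldl
      (fun st item =>
        ((PySem.Dict.ofList item).keys).foldl
          (fun (st' : List String × PySem.Set String) k =>
            if PySem.Set.contains st'.2 k then st'
            else (st'.1 ++ [k], PySem.Set.add st'.2 k)) st) (o, s)
    = (ls.flatMap (fun item => (PySem.Dict.ofList item).keys)).foldl
        (fun (st' : List String × PySem.Set String) k =>
          if PySem.Set.contains st'.2 k then st'
          else (st'.1 ++ [k], PySem.Set.add st'.2 k)) (o, s) := by
  induction ls generalizing o s with
  | nil => rfl
  | cons l ls ih =>
    simp only [List.foldl_cons, List.flatMap_cons, List.foldl_append]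
    rcases hst : ((PySem.Dict.ofList l).keys).foldl
      (fun (st' : List String × PySem.Set String) k =>
        if PySem.Set.contains st'.2 k then st'
        else (st'.1 ++ [k], PySem.Set.add st'.2 k)) (o, s) with ⟨o', s'⟩
    exact ih o' s'

-- B's filter, started after a consumed prefix 'pre' of the full key list, is pvFirstOccs
theorem pv_B_loop (tail pre acc : List String) (keys : List String)
    (hkeys : keys = pre ++ tail) :
    (PySem.List.enumerate tail (pre.length : Int)).foldl
      (fun acc ik =>
        if (PySem.List.slice keys none (some ik.1)).contains ik.2 then acc
        else acc ++ [ik.2]) acc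
    = acc ++ pvFirstOccs pre tail := by
  induction tail generalizing pre acc with
  | nil => simp [PySem.List.enumerate_nil, pvFirstOccs]
  | cons k t ih =>
    simp only [PySem.List.enumerate_cons, List.foldl_cons, pvFirstOccs]
    have hs : PySem.List.slice keys none (some (pre.length : Int)) = pre := by
      rw [PySem.List.slice_to_natCast, hkeys, List.take_left]
    rw [hs]
    have hlen : ((pre.length : Int) + 1) = ((pre ++ [k]).length : Int) := by
      simp
    by_cases hk : pre.contains k = true
    · rw [if_pos hk, if_pos hk, hlen,
        ih (pre ++ [k]) acc (by simpa using hkeys)]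
    · rw [if_neg hk, if_neg hk, hlen,
        ih (pre ++ [k]) (acc ++ [k]) (by simpa using hkeys)]
      simp

theorem pv_B_eq (list_data : List (List (String × Int))) :
    collect_keys_in_order_alt list_data
    = pvFirstOccs [] (list_data.flatMap (fun item => (PySem.Dict.ofList item).keys)) := by
  unfold collect_keys_in_order_alt
  exact pv_B_loop _ [] [] _ rfl

-- ===== VERDICT (by name: the statement is the Claim_ definition above) =====
theorem collect_keys_in_order_spec : Claim_equal_collect_keys_in_order := by
  intro list_data _
  show collect_keys_in_order list_data = collect_keys_in_order_alt list_data
  unfold collect_keys_in_order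
  rw [pv_A_outer, pv_A_loop _ [] PySem.Set.empty [] (by intro x; rfl), pv_B_eq]
  simp
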